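-- pv_equiv track=rewrite | github.com/seanpatel19/sec_finacial_analyzer | src/document_processor.py | _combine_sections
-- ===== SOURCE A (Python) =====
-- from typing import Dict, List, Tuple, Generator
--
-- def _combine_sections(sections: Dict[str, str]) -> str:
--     """Combine extracted sections into readable text"""
--     combined = []
--
--     # Add sections in logical order
--     section_order = ['business', 'business_overview', 'executive_summary', 'mda', 'risk_factors', 'financial_highlights']
--
--     for section in section_order:
--         if section in sections:
--             combined.append(f"\n=== {section.upper().replace('_', ' ')} ===\n")
--             combined.append(sections[section])
--             combined.append("\n")
--
--     # Add any remaining sections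
--     for section_name, content in sections.items():
--         if section_name not in section_order:
--             combined.append(f"\n=== {section_name.upper().replace('_', ' ')} ===\n")
--             combined.append(content)
--             combined.append("\n")
--
--     return ''.join(combined)
-- ===== SOURCE B (Python) =====
-- def _combine_sections(sections):
--     """Combine extracted sections into readable text"""
--     section_order = ['business', 'business_overview', 'executive_summary', 'mda', 'risk_factors', 'financial_highlights']
--     rank = {name: i for i, name in enumerate(section_order)}
--     # Bucket sort: one pass over the dict distributes each formatted block
--     # into the bucket of its rank (unknown names -> last bucket), then the
--     # buckets are concatenated in rank order.
--     buckets = [[] for _ in range(len(section_order) + 1)]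
--     for name, content in sections.items():
--         buckets[rank.get(name, len(section_order))].append(
--             f"\n=== {name.upper().replace('_', ' ')} ===\n{content}\n")
--     return ''.join(block for bucket in buckets for block in bucket)
-- ===== Notes on version B (the rewrite author's own statement) =====
-- stated objective: alternative
-- what changed: B is a bucket sort: one pass over the dict appends each formatted block to the bucket of its rank (known names get their index in section_order, everything else the last bucket), and the buckets are concatenated in rank order; A instead runs two separate passes, one over section_order with a dict lookup and one over the dict items with a membership test, each duplicating the formatting code.
import Mathlib
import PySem

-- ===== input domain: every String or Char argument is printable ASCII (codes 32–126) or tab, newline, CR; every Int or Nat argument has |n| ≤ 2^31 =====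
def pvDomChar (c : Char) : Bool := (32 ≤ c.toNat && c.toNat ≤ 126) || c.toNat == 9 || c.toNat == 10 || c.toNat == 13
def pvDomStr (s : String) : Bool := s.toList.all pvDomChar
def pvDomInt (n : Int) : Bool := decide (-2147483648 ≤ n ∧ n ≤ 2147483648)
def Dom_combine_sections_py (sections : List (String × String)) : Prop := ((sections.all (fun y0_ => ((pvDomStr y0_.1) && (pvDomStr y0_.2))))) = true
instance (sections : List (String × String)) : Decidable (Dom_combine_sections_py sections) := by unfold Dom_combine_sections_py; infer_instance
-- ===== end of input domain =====

-- B replaces A's two ordered formatting passes by a bucket sort: one pass over the dict distributes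
-- each formatted block into its rank bucket, then the buckets are concatenated; same output ("alternative").


-- ===== PORT A =====
-- section.upper().replace('_', ' ') wrapped in the "=== ... ===" header (the shared f-string shape)
def pvHdr (s : String) : String :=
  "\n=== " ++ PySem.Str.replace (PySem.Str.upper s) "_" " " ++ " ===\n"

def pvOrder : List String :=
  ["business", "business_overview", "executive_summary", "mda", "risk_factors", "financial_highlights"]

-- dict membership + lookup 'section in sections' / 'sections[section]' = first key match on the assoc list
def combine_sections_py (sections : List (String × String)) : String :=
  -- first loop: known names in order (the three appends, nothing when the key is absent)
  let c1 : List String := pvOrder.foldl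
    (fun acc s => acc ++ (match sections.find? (fun p => p.1 == s) with
      | some p => [pvHdr s, p.2, "\n"]
      | none => [])) []
  -- second loop: remaining items in insertion order
  let c2 : List String := sections.foldl
    (fun acc p => acc ++ (if pvOrder.contains p.1 then [] else [pvHdr p.1, p.2, "\n"])) c1
  PySem.Str.join "" c2

-- ===== PORT B =====
-- rank = {name: i for i, name in enumerate(section_order)}; rank.get(name, 6) maps each
-- order name to its (first) index and everything else to 6 = len(section_order), i.e. List.idxOf
def pvRank (s : String) : Nat := pvOrder.idxOf s

-- the loop body: buckets[rank.get(name, 6)].append(formatted block)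
def pvStep (b : List (List String)) (p : String × String) : List (List String) :=
  let r := pvRank p.1
  b.set r (b.getD r [] ++ [pvHdr p.1 ++ p.2 ++ "\n"])

-- bucket sort: one pass distributes each block into its rank bucket, then join the flattened buckets
def combine_sections_py_alt (sections : List (String × String)) : String :=
  let buckets : List (List String) := sections.foldl pvStep (List.replicate 7 [])
  PySem.Str.join "" buckets.flatten

-- ===== PRECONDITION & SPEC =====
-- Pre_ excludes association lists with duplicate keys: they do not represent any Python dict
-- (the original's input), and on a duplicated order-key A's first-match lookup and B's bucket
-- pass would each be a defensible reading.
def Pre_combine_sections_py (sections : List (String × String)) : Prop :=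
  (sections.map Prod.fst).Nodup
instance (sections : List (String × String)) : Decidable (Pre_combine_sections_py sections) := by unfold Pre_combine_sections_py; infer_instance

def pvWitness_combine_sections_py : (List (String × String)) :=
  [("mda", "numbers went up"), ("legal", "none pending")]

def Spec_combine_sections_py (sections : List (String × String)) (out : String) : Prop := out = combine_sections_py_alt sections
instance (sections : List (String × String)) (out : String) : Decidable (Spec_combine_sections_py sections out) := by unfold Spec_combine_sections_py; infer_instance

-- ===== CLAIM (what is proved, stated in full; the proofs are below) =====
def Claim_equal_combine_sections_py : Prop := ∀ (sections : List (String × String)), Dom_combine_sections_py sections → Pre_combine_sections_py sections → Spec_combine_sections_py sections (combine_sections_py sections)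

-- ===== LEMMAS AND PROOFS =====

theorem pvRank_eq (s : String) : pvRank s =
    if "business" = s then 0 else if "business_overview" = s then 1 else
    if "executive_summary" = s then 2 else if "mda" = s then 3 else
    if "risk_factors" = s then 4 else if "financial_highlights" = s then 5 else 6 := by
  simp only [pvRank, pvOrder, List.idxOf_cons, List.idxOf_nil, Bool.cond_eq_ite, beq_iff_eq]
  split_ifs <;> simp_all

-- the blocks of rank i emitted by the single pass, in insertion order
def pvB (i : Nat) (l : List (String × String)) : List String :=
  (l.filter (fun p => pvRank p.1 == i)).map (fun p => pvHdr p.1 ++ p.2 ++ "\n")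

theorem pvB_nil (i : Nat) : pvB i [] = [] := rfl

theorem pvStep_eval (b : List (List String)) (p : String × String) :
    pvStep b p = b.set (pvRank p.1) (b.getD (pvRank p.1) [] ++ [pvHdr p.1 ++ p.2 ++ "\n"]) := rfl

theorem fold_buckets (l : List (String × String)) (b0 b1 b2 b3 b4 b5 b6 : List String) :
    l.foldl pvStep [b0, b1, b2, b3, b4, b5, b6]
    = [b0 ++ pvB 0 l, b1 ++ pvB 1 l, b2 ++ pvB 2 l, b3 ++ pvB 3 l,
       b4 ++ pvB 4 l, b5 ++ pvB 5 l, b6 ++ pvB 6 l] := by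
  induction l generalizing b0 b1 b2 b3 b4 b5 b6 with
  | nil => simp [pvB_nil]
  | cons p t ih =>
    have hr := pvRank_eq p.1
    simp only [List.foldl_cons]
    split_ifs at hr <;>
      (rw [pvStep_eval]
       simp only [hr, List.set, List.getD, List.getElem?_cons_zero, List.getElem?_cons_succ,
         Option.getD_some]
       rw [ih]
       simp [pvB, hr])

-- (pvRank s == i) decided by name, for each bucket
theorem rank_beq0 (s : String) : (pvRank s == 0) = (s == "business") := by
  rw [pvRank_eq]; split_ifs <;> simp [beq_iff_eq] <;> simp_all [@eq_comm String]
theorem rank_beq1 (s : String) : (pvRank s == 1) = (s == "business_overview") := by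
  rw [pvRank_eq]; split_ifs <;> simp [beq_iff_eq] <;> simp_all [@eq_comm String]
theorem rank_beq2 (s : String) : (pvRank s == 2) = (s == "executive_summary") := by
  rw [pvRank_eq]; split_ifs <;> simp [beq_iff_eq] <;> simp_all [@eq_comm String]
theorem rank_beq3 (s : String) : (pvRank s == 3) = (s == "mda") := by
  rw [pvRank_eq]; split_ifs <;> simp [beq_iff_eq] <;> simp_all [@eq_comm String]
theorem rank_beq4 (s : String) : (pvRank s == 4) = (s == "risk_factors") := by
  rw [pvRank_eq]; split_ifs <;> simp [beq_iff_eq] <;> simp_all [@eq_comm String]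
theorem rank_beq5 (s : String) : (pvRank s == 5) = (s == "financial_highlights") := by
  rw [pvRank_eq]; split_ifs <;> simp [beq_iff_eq] <;> simp_all [@eq_comm String]
theorem rank_beq6 (s : String) : (pvRank s == 6) = !(pvOrder.contains s) := by
  rw [pvRank_eq]
  simp only [pvOrder, List.contains_cons, List.contains_nil]
  split_ifs <;> simp [beq_iff_eq] <;> simp_all [@eq_comm String]

-- under unique keys, filtering by a key keeps exactly what find? (first match) finds
theorem filter_key_eq_find (s : String) (l : List (String × String))
    (h : (l.map Prod.fst).Nodup) :
    l.filter (fun p => p.1 == s) = (match l.find? (fun q : String × String => q.1 == s) with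
      | some p => [p] | none => []) := by
  induction l with
  | nil => rfl
  | cons q t ih =>
    simp only [List.map_cons, List.nodup_cons] at h
    by_cases hq : q.1 = s
    · have ht : t.filter (fun p => p.1 == s) = [] := by
        rw [List.filter_eq_nil_iff]
        intro p hp
        simp only [beq_iff_eq]
        intro hps
        exact h.1 (hq ▸ hps ▸ List.mem_map_of_mem hp)
      simp [hq, ht]
    · simp [hq, ih h.2]

-- A's three-append match term spells the same characters as the filtered single-block form
theorem order_term (s : String) (l : List (String × String))
    (h : (l.map Prod.fst).Nodup) :
    ((match l.find? (fun q : String × String => q.1 == s) with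
      | some p => [pvHdr s, p.2, "\n"]
      | none => ([] : List String)).map String.toList).flatten
    = (((l.filter (fun p => p.1 == s)).map
        (fun p => pvHdr p.1 ++ p.2 ++ "\n")).map String.toList).flatten := by
  rw [filter_key_eq_find s l h]
  cases hf : l.find? (fun q : String × String => q.1 == s) with
  | none => rfl
  | some p =>
    have hps : p.1 = s := by simpa [beq_iff_eq] using List.find?_some hf
    simp [hps]

theorem intersperse_nil_flatten (l : List (List Char)) :
    (List.intersperse ([] : List Char) l).flatten = l.flatten := by
  match l with
  | [] => rfl
  | [a] => rfl
  | a :: b :: t =>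
    simp only [List.intersperse, List.flatten_cons, List.nil_append]
    rw [intersperse_nil_flatten (b :: t), List.flatten_cons]

theorem join_empty_sep (l : List String) :
    PySem.Str.join "" l = String.ofList (l.map String.toList).flatten := by
  simp [PySem.Str.join, PySem.Chars.join, List.intercalate, intersperse_nil_flatten]


-- A's leftover loop spells the same characters as the filtered single-block form
theorem leftover_part (l : List (String × String)) :
    ((l.flatMap (fun p => (if pvOrder.contains p.1 then ([] : List String)
        else [pvHdr p.1, p.2, "\n"]))).map String.toList).flatten
    = (((l.filter (fun p => !(pvOrder.contains p.1))).map
        (fun p => pvHdr p.1 ++ p.2 ++ "\n")).map String.toList).flatten := by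
  induction l with
  | nil => rfl
  | cons p t ih =>
    simp only [List.flatMap_cons, List.filter_cons]
    cases h : pvOrder.contains p.1 with
    | true => simpa [h] using ih
    | false =>
      simp only [Bool.not_false, if_neg Bool.false_ne_true, ite_true, List.map_cons,
        List.map_append, List.flatten_cons, List.flatten_append, ih]
      simp

theorem order_flatMap (f : String → List String) :
    pvOrder.flatMap f = f "business" ++ f "business_overview" ++ f "executive_summary"
      ++ f "mda" ++ f "risk_factors" ++ f "financial_highlights" := by
  simp [pvOrder]

theorem combine_sections_py_spec : Claim_equal_combine_sections_py := by
  intro sections _ hpre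
  unfold Spec_combine_sections_py combine_sections_py combine_sections_py_alt
  dsimp only
  rw [PySem.List.foldl_append_eq_flatMap, PySem.List.foldl_append_eq_flatMap]
  rw [show (List.replicate 7 ([] : List String)) = [[], [], [], [], [], [], []] from rfl]
  rw [fold_buckets]
  rw [join_empty_sep, join_empty_sep]
  congr 1
  -- rewrite each bucket to the name-filtered form
  rw [show pvB 0 sections = (sections.filter (fun p => p.1 == "business")).map
        (fun p => pvHdr p.1 ++ p.2 ++ "\n") from by
      unfold pvB; rw [List.filter_congr (fun p _ => rank_beq0 p.1)]]
  rw [show pvB 1 sections = (sections.filter (fun p => p.1 == "business_overview")).map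
        (fun p => pvHdr p.1 ++ p.2 ++ "\n") from by
      unfold pvB; rw [List.filter_congr (fun p _ => rank_beq1 p.1)]]
  rw [show pvB 2 sections = (sections.filter (fun p => p.1 == "executive_summary")).map
        (fun p => pvHdr p.1 ++ p.2 ++ "\n") from by
      unfold pvB; rw [List.filter_congr (fun p _ => rank_beq2 p.1)]]
  rw [show pvB 3 sections = (sections.filter (fun p => p.1 == "mda")).map
        (fun p => pvHdr p.1 ++ p.2 ++ "\n") from by
      unfold pvB; rw [List.filter_congr (fun p _ => rank_beq3 p.1)]]
  rw [show pvB 4 sections = (sections.filter (fun p => p.1 == "risk_factors")).map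
        (fun p => pvHdr p.1 ++ p.2 ++ "\n") from by
      unfold pvB; rw [List.filter_congr (fun p _ => rank_beq4 p.1)]]
  rw [show pvB 5 sections = (sections.filter (fun p => p.1 == "financial_highlights")).map
        (fun p => pvHdr p.1 ++ p.2 ++ "\n") from by
      unfold pvB; rw [List.filter_congr (fun p _ => rank_beq5 p.1)]]
  rw [show pvB 6 sections = (sections.filter (fun p => !(pvOrder.contains p.1))).map
        (fun p => pvHdr p.1 ++ p.2 ++ "\n") from by
      unfold pvB; rw [List.filter_congr (fun p _ => rank_beq6 p.1)]]
  -- expand the order loop over the six literal names, keep pvOrder folded elsewhere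
  rw [order_flatMap]
  simp only [List.nil_append, List.map_append, List.flatten_append,
    List.flatten_cons, List.flatten_nil, List.append_nil]
  rw [order_term _ _ hpre, order_term _ _ hpre, order_term _ _ hpre,
    order_term _ _ hpre, order_term _ _ hpre, order_term _ _ hpre, leftover_part]
  simp [List.append_assoc]
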